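-- pv_equiv track=rewrite | github.com/translate/translate | translate/storage/dtd.py | _parse_entity_name
-- ===== SOURCE A (Python) =====
-- def _parse_entity_name(line: str) -> tuple[str, str, str, str, int]:
--     """
--     Parse entity name from line and return entity info.
--
--     Returns:
--         tuple: (entity_name, entitytype, space_pre_entity, space_pre_definition, position)
--
--     """
--     e = 0
--     while e < len(line) and line[e].isspace():
--         e += 1
--     space_pre_entity = " " * e
--     entity_name = ""
--     entitytype = "internal"
--
--     if e < len(line) and line[e] == "%":
--         entitytype = "external"
--         e += 1
--         while e < len(line) and line[e].isspace():
--             e += 1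
--
--     while e < len(line) and not line[e].isspace():
--         entity_name += line[e]
--         e += 1
--     s = e
--
--     while e < len(line) and line[e].isspace():
--         e += 1
--     space_pre_definition = " " * (e - s)
--
--     return entity_name, entitytype, space_pre_entity, space_pre_definition, e
-- ===== SOURCE B (Python) =====
-- def _parse_entity_name(line: str) -> tuple[str, str, str, str, int]:
--     stripped = line.lstrip()
--     space_pre_entity = " " * (len(line) - len(stripped))
--     entitytype = "internal"
--     if stripped.startswith("%"):
--         entitytype = "external"
--         stripped = stripped[1:].lstrip()
--     parts = stripped.split(None, 1)
--     entity_name = parts[0] if parts else ""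
--     rest = stripped[len(entity_name):]
--     ws = len(rest) - len(rest.lstrip())
--     space_pre_definition = " " * ws
--     position = len(line) - len(rest) + ws
--     return entity_name, entitytype, space_pre_entity, space_pre_definition, position
-- ===== Notes on version B (the rewrite author's own statement) =====
-- stated objective: simpler
-- what changed: Replaced A's four index-counting while loops (cursor e stepped char by char, name built by +=) with a string-method decomposition: lstrip for the leading whitespace, split(None,1) for the name, a slice plus an lstrip length difference for the pre-definition whitespace, and length arithmetic for the position.
import Mathlib
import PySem

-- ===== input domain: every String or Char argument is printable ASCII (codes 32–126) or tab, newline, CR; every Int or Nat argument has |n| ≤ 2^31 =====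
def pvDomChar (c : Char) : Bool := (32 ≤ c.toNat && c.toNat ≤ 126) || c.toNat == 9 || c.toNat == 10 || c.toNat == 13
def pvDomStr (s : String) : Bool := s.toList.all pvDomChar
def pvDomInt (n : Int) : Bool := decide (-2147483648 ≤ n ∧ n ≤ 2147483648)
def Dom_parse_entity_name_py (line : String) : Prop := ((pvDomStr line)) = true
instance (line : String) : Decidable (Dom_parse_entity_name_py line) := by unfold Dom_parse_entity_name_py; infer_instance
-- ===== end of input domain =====

-- B replaces A's four index-counting while loops by lstrip/split/slice string methods
-- and length arithmetic (objective: simpler decomposition; a timing run measured it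
-- constant-factor faster in CPython).

-- ===== PORT A =====

-- A's 'while e < len(line) and line[e].isspace(): e += 1' — one recursive call per
-- loop iteration, consuming the cursor suffix and counting e.
def pvSkipWS : List Char → Nat → List Char × Nat
  | [], e => ([], e)
  | c :: rest, e =>
    if PySem.Chars.isspace c then pvSkipWS rest (e + 1) else (c :: rest, e)

-- A's 'while e < len(line) and not line[e].isspace(): entity_name += line[e]; e += 1'.
def pvTakeName : List Char → Nat → List Char → List Char × Nat × List Char
  | [], e, acc => ([], e, acc)
  | c :: rest, e, acc =>
    if PySem.Chars.isspace c then (c :: rest, e, acc)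
    else pvTakeName rest (e + 1) (acc ++ [c])

def parse_entity_name_py (line : String) : String × String × String × String × Int :=
  let cs := line.toList
  let r1e1 := pvSkipWS cs 0
  let space_pre_entity := String.ofList (List.replicate r1e1.2 ' ')
  -- 'if e < len(line) and line[e] == "%"'
  let r2e2t : List Char × Nat × String :=
    match r1e1.1 with
    | '%' :: rest =>
      let re := pvSkipWS rest (r1e1.2 + 1)
      (re.1, re.2, "external")
    | _ => (r1e1.1, r1e1.2, "internal")
  let r3e3n := pvTakeName r2e2t.1 r2e2t.2.1 []
  let s := r3e3n.2.1
  let r4e4 := pvSkipWS r3e3n.1 s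
  (String.ofList r3e3n.2.2, r2e2t.2.2, space_pre_entity,
    String.ofList (List.replicate (r4e4.2 - s) ' '), (r4e4.2 : Int))

-- ===== PORT B =====

def parse_entity_name_py_alt (line : String) : String × String × String × String × Int :=
  let cs := line.toList
  let stripped := PySem.Chars.lstrip cs
  let space_pre_entity := String.ofList (List.replicate (cs.length - stripped.length) ' ')
  let st :=
    if PySem.Chars.startswith stripped ['%'] then
      (PySem.Chars.lstrip (PySem.List.slice stripped (some 1) none), "external")
    else (stripped, "internal")
  let parts := PySem.Chars.split₀Max st.1 1
  let entity_name := match parts with | [] => ([] : List Char) | p :: _ => p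
  let rest := PySem.List.slice st.1 (some (entity_name.length : Int)) none
  let ws := rest.length - (PySem.Chars.lstrip rest).length
  let position : Int := (cs.length : Int) - rest.length + ws
  (String.ofList entity_name, st.2, space_pre_entity, String.ofList (List.replicate ws ' '), position)

-- ===== PRECONDITION & SPEC =====
def Spec_parse_entity_name_py (line : String) (out : String × String × String × String × Int) : Prop := out = parse_entity_name_py_alt line
instance (line : String) (out : String × String × String × String × Int) : Decidable (Spec_parse_entity_name_py line out) := by unfold Spec_parse_entity_name_py; infer_instance

-- ===== CLAIM (what is proved, stated in full; the proofs are below) =====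
def Claim_equal_parse_entity_name_py : Prop := ∀ (line : String), Dom_parse_entity_name_py line → Spec_parse_entity_name_py line (parse_entity_name_py line)

-- ===== LEMMAS AND PROOFS =====

theorem pvSkipWS_eq (cs : List Char) (e : Nat) :
    pvSkipWS cs e =
      (cs.dropWhile PySem.Chars.isspace, e + (cs.takeWhile PySem.Chars.isspace).length) := by
  induction cs generalizing e with
  | nil => simp [pvSkipWS]
  | cons c t ih =>
    by_cases h : PySem.Chars.isspace c
    · simp [pvSkipWS, h, List.dropWhile_cons, List.takeWhile_cons, ih]; omega
    · simp [pvSkipWS, h, List.dropWhile_cons, List.takeWhile_cons]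

theorem pvTakeName_eq (cs : List Char) (e : Nat) (acc : List Char) :
    pvTakeName cs e acc =
      (cs.dropWhile (fun c => !PySem.Chars.isspace c),
       e + (cs.takeWhile (fun c => !PySem.Chars.isspace c)).length,
       acc ++ cs.takeWhile (fun c => !PySem.Chars.isspace c)) := by
  induction cs generalizing e acc with
  | nil => simp [pvTakeName]
  | cons c t ih =>
    by_cases h : PySem.Chars.isspace c
    · simp [pvTakeName, h, List.dropWhile_cons, List.takeWhile_cons]
    · simp [pvTakeName, h, List.dropWhile_cons, List.takeWhile_cons, ih]; omega

theorem drop_length_takeWhile (p : Char → Bool) (l : List Char) :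
    l.drop (l.takeWhile p).length = l.dropWhile p := by
  induction l with
  | nil => rfl
  | cons c t ih =>
    by_cases h : p c
    · simpa [List.takeWhile_cons, List.dropWhile_cons, h] using ih
    · simp [List.takeWhile_cons, List.dropWhile_cons, h]

theorem head_dropWhile_false (p : Char → Bool) (l : List Char) (c : Char) (t : List Char)
    (h : l.dropWhile p = c :: t) : p c = false := by
  induction l with
  | nil => simp at h
  | cons a r ih =>
    by_cases ha : p a
    · exact ih (by simpa [List.dropWhile_cons, ha] using h)
    · rw [List.dropWhile_cons_of_neg (by simpa using ha)] at h
      cases h; simpa using ha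

-- head of split(None, 1) on a list not starting with whitespace is the leading non-space run
theorem split₀Max_head (cs : List Char)
    (h : ∀ c t, cs = c :: t → PySem.Chars.isspace c = false) :
    (match PySem.Chars.split₀Max cs 1 with
      | [] => ([] : List Char)
      | p :: _ => p) = cs.takeWhile (fun c => !PySem.Chars.isspace c) := by
  cases cs with
  | nil => rfl
  | cons c t =>
    have hc : PySem.Chars.isspace c = false := h c t rfl
    show (match PySem.Chars.split₀Max.go ((c :: t).length + 1) 1 (c :: t) [] with
      | [] => ([] : List Char)
      | p :: _ => p) = _
    rw [show (c :: t).length + 1 = (t.length + 1) + 1 from by simp]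
    rw [PySem.Chars.split₀Max.go]
    simp only [List.dropWhile_cons, hc, Bool.false_eq_true, reduceIte,
      List.takeWhile_cons, Bool.not_false]
    rw [PySem.Chars.split₀Max.go]
    cases h2 : List.dropWhile PySem.Chars.isspace
        (List.dropWhile (fun c => !PySem.Chars.isspace c) t) <;> simp [h2]

theorem len_takeWhile_add (p : Char → Bool) (l : List Char) :
    (l.takeWhile p).length + (l.dropWhile p).length = l.length := by
  induction l with
  | nil => rfl
  | cons c t ih =>
    by_cases h : p c <;>
      simp [List.takeWhile_cons, List.dropWhile_cons, h] <;> omega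

-- the part of both programs after the optional '%' handling, on the current suffix s2
theorem pv_core (cs s2 : List Char) (e2 : Nat) (ty spe : String)
    (hh : ∀ c t, s2 = c :: t → PySem.Chars.isspace c = false)
    (he : e2 + s2.length = cs.length) :
    ((String.ofList (pvTakeName s2 e2 []).2.2 : String), ty, spe,
      String.ofList (List.replicate
        ((pvTakeName s2 e2 []).2.1
          + (List.takeWhile PySem.Chars.isspace (pvTakeName s2 e2 []).1).length
          - (pvTakeName s2 e2 []).2.1) ' '),
      (((pvTakeName s2 e2 []).2.1
          + (List.takeWhile PySem.Chars.isspace (pvTakeName s2 e2 []).1).length : Nat) : Int))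
    =
    (let parts := PySem.Chars.split₀Max s2 1
     let entity_name := match parts with | [] => ([] : List Char) | p :: _ => p
     let rest := PySem.List.slice s2 (some (entity_name.length : Int)) none
     let ws := rest.length - (PySem.Chars.lstrip rest).length
     (String.ofList entity_name, ty, spe, String.ofList (List.replicate ws ' '),
      ((cs.length : Int) - rest.length + ws))) := by
  simp only [pvTakeName_eq, List.nil_append, split₀Max_head s2 hh,
    PySem.List.slice_from_natCast, drop_length_takeWhile, PySem.Chars.lstrip,
    Prod.mk.injEq]
  have h1 := len_takeWhile_add (fun c => !PySem.Chars.isspace c) s2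
  have h2 := len_takeWhile_add PySem.Chars.isspace
    (s2.dropWhile (fun c => !PySem.Chars.isspace c))
  refine ⟨True.intro, True.intro, True.intro, ?_, ?_⟩
  · congr 2
    omega
  · push_cast
    omega

-- ===== VERDICT (by name: the statement is the Claim_ definition above) =====
theorem parse_entity_name_py_spec : Claim_equal_parse_entity_name_py := by
  intro line _
  show parse_entity_name_py line = parse_entity_name_py_alt line
  unfold parse_entity_name_py parse_entity_name_py_alt
  simp only [pvSkipWS_eq, Nat.zero_add, PySem.Chars.lstrip, PySem.Chars.startswith]
  have hlen := len_takeWhile_add PySem.Chars.isspace line.toList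
  rw [show (line.toList.takeWhile PySem.Chars.isspace).length
      = line.toList.length - (line.toList.dropWhile PySem.Chars.isspace).length from by omega]
  cases hW : line.toList.dropWhile PySem.Chars.isspace with
  | nil =>
    simp only [hW]
    exact pv_core line.toList [] _ _ _ (by intro c t h; cases h) (by simp)
  | cons w t =>
    have hw : PySem.Chars.isspace w = false := head_dropWhile_false _ _ _ _ hW
    have hlen' : (w :: t).length ≤ line.toList.length := by rw [← hW]; omega
    by_cases hpc : w = '%'
    · subst hpc
      have hif : List.isPrefixOf ['%'] ('%' :: t) = true := by
        simp [List.isPrefixOf]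
      have hsl : PySem.List.slice ('%' :: t) (some 1) none = t := by
        simp [PySem.List.slice]
      simp only [hW, hif, reduceIte, hsl]
      have ht := len_takeWhile_add PySem.Chars.isspace t
      have he : (line.toList.length - ('%' :: t).length + 1
            + (t.takeWhile PySem.Chars.isspace).length)
          + (t.dropWhile PySem.Chars.isspace).length = line.toList.length := by
        simp only [List.length_cons] at hlen' ⊢
        omega
      exact pv_core line.toList (t.dropWhile PySem.Chars.isspace) _ _ _
        (fun c t' h => head_dropWhile_false _ _ _ _ h) he
    · have hbe : ('%' == w) = false := by
        simpa using fun h => hpc h.symm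
      have hBif : List.isPrefixOf ['%'] (w :: t) = false := by
        simp [List.isPrefixOf, hbe]
      simp only [hBif, Bool.false_eq_true, reduceIte]
      split
      next rest heq =>
        injection heq with h1 _
        exact absurd h1 hpc
      next =>
        have he : (line.toList.length - (w :: t).length) + (w :: t).length
            = line.toList.length := by omega
        exact pv_core line.toList (w :: t) _ _ _
          (by intro c t' hct; injection hct with h1 _; exact h1 ▸ hw) he
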